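-- pv_equiv track=rewrite | github.com/Fondamenti18/fondamenti-di-programmazione | students/1753339/homework03/program03.py | colora_perimetro
-- ===== SOURCE A (Python) =====
-- def colora_perimetro(img,h,w,fin2,colori_mod2):
--     lista2 = []
--     l = len(fin2)
--     for i in range(l):
--         fin = fin2[i]
--         colore2 = colori_mod2[i][1]
--         base = fin[1][0] - fin[0][0]
--         altezza = fin[2][1] - fin[3][1] - 1
--         lato_a = fin[0][0]
--         lato_b = fin[1][0] - 1
--         lista = []
--         for x in range(base):
--             img[lato_a][x] = colore2
--             lista.append((lato_a,x))
--         for y in range(altezza):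
--             img[y][lato_b] = colore2
--             lista.append((y,lato_b))
--         for y in range(base):
--             img[lato_b][y] = colore2
--             lista.append((lato_b,y))
--         for x in range(altezza):
--             img[x][lato_a] = colore2
--             lista.append((x,lato_a))
--         lista2.append(lista)
--     return lista2
-- ===== SOURCE B (Python) =====
-- def colora_perimetro(img, h, w, fin2, colori_mod2):
--     lista2 = []
--     for i, fin in enumerate(fin2):
--         colore2 = colori_mod2[i][1]
--         base = fin[1][0] - fin[0][0]
--         altezza = fin[2][1] - fin[3][1] - 1
--         a = fin[0][0]
--         b = fin[1][0] - 1
--         nb = max(base, 0)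
--         na = max(altezza, 0)
--         lista = []
--         for k in range(2 * nb + 2 * na):
--             if k < nb:
--                 rc = (a, k)
--             elif k < nb + na:
--                 rc = (k - nb, b)
--             elif k < 2 * nb + na:
--                 rc = (b, k - nb - na)
--             else:
--                 rc = (k - 2 * nb - na, a)
--             img[rc[0]][rc[1]] = colore2
--             lista.append(rc)
--         lista2.append(lista)
--     return lista2
-- ===== Notes on version B (the rewrite author's own statement) =====
-- stated objective: alternative
-- what changed: B replaces A's four separate side loops per rectangle by a single loop over one index range of the whole perimeter length, computing each pixel's coordinate from the index by a closed-form if-chain (arithmetic de-parameterisation of the four sides).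
import Mathlib
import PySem

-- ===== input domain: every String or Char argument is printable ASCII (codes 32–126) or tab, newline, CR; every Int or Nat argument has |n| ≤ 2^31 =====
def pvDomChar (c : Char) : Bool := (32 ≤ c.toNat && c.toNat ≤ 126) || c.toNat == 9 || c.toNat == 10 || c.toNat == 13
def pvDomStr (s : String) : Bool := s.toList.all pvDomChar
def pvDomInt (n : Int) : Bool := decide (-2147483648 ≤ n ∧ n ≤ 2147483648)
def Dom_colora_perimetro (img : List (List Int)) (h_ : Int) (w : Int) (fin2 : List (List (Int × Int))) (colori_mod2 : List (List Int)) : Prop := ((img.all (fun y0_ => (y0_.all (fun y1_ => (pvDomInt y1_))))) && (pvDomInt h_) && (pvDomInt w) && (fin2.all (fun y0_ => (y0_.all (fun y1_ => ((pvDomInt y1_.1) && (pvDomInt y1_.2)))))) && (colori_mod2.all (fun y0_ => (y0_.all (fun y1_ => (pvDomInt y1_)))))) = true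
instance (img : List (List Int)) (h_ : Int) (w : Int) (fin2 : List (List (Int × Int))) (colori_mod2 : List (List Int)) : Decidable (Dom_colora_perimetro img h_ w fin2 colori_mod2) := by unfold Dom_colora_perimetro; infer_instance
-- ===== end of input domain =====

-- B replaces A's four separate side loops per rectangle by a single loop over one index range of
-- the whole perimeter length, computing each pixel's coordinate from the index by a closed-form
-- if-chain (objective: alternative). Both Pythons mutate img in place identically on Pre_; img's
-- content never influences the returned lists, so both ports model the RETURN VALUE only (the
-- in-place writes are omitted; Pre_ excludes exactly the inputs where a write or read raises
-- IndexError).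

-- ===== PORT A =====
-- Transliteration of A's list-building: outer loop over range(len(fin2)) indexing fin2, four
-- successive append loops growing `lista`, then lista2.append(lista). (img writes omitted, see above.)
def colora_perimetro (img : List (List Int)) (h_ : Int) (w : Int) (fin2 : List (List (Int × Int))) (colori_mod2 : List (List Int)) : List (List (Int × Int)) :=
  let l : Int := fin2.length
  (PySem.List.pyRange 0 l 1).foldl (fun lista2 i =>
    let fin := PySem.List.pyGetD fin2 i []
    let base := (PySem.List.pyGetD fin 1 (0,0)).1 - (PySem.List.pyGetD fin 0 (0,0)).1
    let altezza := (PySem.List.pyGetD fin 2 (0,0)).2 - (PySem.List.pyGetD fin 3 (0,0)).2 - 1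
    let lato_a := (PySem.List.pyGetD fin 0 (0,0)).1
    let lato_b := (PySem.List.pyGetD fin 1 (0,0)).1 - 1
    let lista := (PySem.List.pyRange 0 base 1).foldl (fun lista x => lista ++ [(lato_a, x)]) []
    let lista := (PySem.List.pyRange 0 altezza 1).foldl (fun lista y => lista ++ [(y, lato_b)]) lista
    let lista := (PySem.List.pyRange 0 base 1).foldl (fun lista y => lista ++ [(lato_b, y)]) lista
    let lista := (PySem.List.pyRange 0 altezza 1).foldl (fun lista x => lista ++ [(x, lato_a)]) lista
    lista2 ++ [lista]) []

-- ===== PORT B =====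
-- Transliteration of Source B: loop over enumerate(fin2); one loop over range(2*nb+2*na) computing
-- each coordinate from the running index k by the if-chain. (img paint writes omitted, see above.)
def colora_perimetro_alt (img : List (List Int)) (h_ : Int) (w : Int) (fin2 : List (List (Int × Int))) (colori_mod2 : List (List Int)) : List (List (Int × Int)) :=
  (PySem.List.enumerate fin2 0).foldl (fun lista2 p =>
    let fin := p.2
    let base := (PySem.List.pyGetD fin 1 (0,0)).1 - (PySem.List.pyGetD fin 0 (0,0)).1
    let altezza := (PySem.List.pyGetD fin 2 (0,0)).2 - (PySem.List.pyGetD fin 3 (0,0)).2 - 1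
    let a := (PySem.List.pyGetD fin 0 (0,0)).1
    let b := (PySem.List.pyGetD fin 1 (0,0)).1 - 1
    let nb := max base 0
    let na := max altezza 0
    let lista := (PySem.List.pyRange 0 (2*nb + 2*na) 1).foldl (fun lista k =>
      let rc := if k < nb then (a, k)
                else if k < nb + na then (k - nb, b)
                else if k < 2*nb + na then (b, k - nb - na)
                else (k - 2*nb - na, a)
      lista ++ [rc]) []
    lista2 ++ [lista]) []

-- ===== PRECONDITION & SPEC =====
-- Pre_ = exactly the inputs on which Python A returns (no IndexError): colori_mod2 long enough with
-- rows of length ≥ 2 where used, every rectangle with ≥ 4 corners, and every img cell A writes in range.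
def Pre_colora_perimetro (img : List (List Int)) (h_ : Int) (w : Int) (fin2 : List (List (Int × Int))) (colori_mod2 : List (List Int)) : Prop :=
  fin2.length ≤ colori_mod2.length ∧
  (∀ c ∈ colori_mod2.take fin2.length, 2 ≤ c.length) ∧
  (∀ fin ∈ fin2, 4 ≤ fin.length ∧
    (let base := (PySem.List.pyGetD fin 1 (0,0)).1 - (PySem.List.pyGetD fin 0 (0,0)).1
     let altezza := (PySem.List.pyGetD fin 2 (0,0)).2 - (PySem.List.pyGetD fin 3 (0,0)).2 - 1
     let lato_a := (PySem.List.pyGetD fin 0 (0,0)).1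
     let lato_b := (PySem.List.pyGetD fin 1 (0,0)).1 - 1
     (0 < base →
        PySem.Raise.InRange img.length lato_a ∧ base ≤ ((PySem.List.pyGetD img lato_a []).length : Int) ∧
        PySem.Raise.InRange img.length lato_b ∧ base ≤ ((PySem.List.pyGetD img lato_b []).length : Int)) ∧
     (0 < altezza →
        altezza ≤ (img.length : Int) ∧
        ∀ row ∈ img.take altezza.toNat,
          PySem.Raise.InRange row.length lato_b ∧ PySem.Raise.InRange row.length lato_a)))
instance (img : List (List Int)) (h_ : Int) (w : Int) (fin2 : List (List (Int × Int))) (colori_mod2 : List (List Int)) : Decidable (Pre_colora_perimetro img h_ w fin2 colori_mod2) := by unfold Pre_colora_perimetro; infer_instance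

def pvWitness_colora_perimetro : List (List Int) × Int × Int × (List (List (Int × Int))) × List (List Int) :=
  ([[0,0],[0,0]], 2, 2, [[(0,0),(2,0),(0,2),(0,0)]], [[0,5]])

def Spec_colora_perimetro (img : List (List Int)) (h_ : Int) (w : Int) (fin2 : List (List (Int × Int))) (colori_mod2 : List (List Int)) (out : List (List (Int × Int))) : Prop := out = colora_perimetro_alt img h_ w fin2 colori_mod2
instance (img : List (List Int)) (h_ : Int) (w : Int) (fin2 : List (List (Int × Int))) (colori_mod2 : List (List Int)) (out : List (List (Int × Int))) : Decidable (Spec_colora_perimetro img h_ w fin2 colori_mod2 out) := by unfold Spec_colora_perimetro; infer_instance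

-- ===== CLAIM (what is proved, stated in full; the proofs are below) =====
def Claim_equal_colora_perimetro : Prop := ∀ (img : List (List Int)) (h_ : Int) (w : Int) (fin2 : List (List (Int × Int))) (colori_mod2 : List (List Int)), Dom_colora_perimetro img h_ w fin2 colori_mod2 → Pre_colora_perimetro img h_ w fin2 colori_mod2 → Spec_colora_perimetro img h_ w fin2 colori_mod2 (colora_perimetro img h_ w fin2 colori_mod2)

-- ===== LEMMAS AND PROOFS =====

-- per-rectangle body as A computes it (four concatenated side maps)
def pvBodyA (fin : List (Int × Int)) : List (Int × Int) :=
  let base := (PySem.List.pyGetD fin 1 (0,0)).1 - (PySem.List.pyGetD fin 0 (0,0)).1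
  let altezza := (PySem.List.pyGetD fin 2 (0,0)).2 - (PySem.List.pyGetD fin 3 (0,0)).2 - 1
  let lato_a := (PySem.List.pyGetD fin 0 (0,0)).1
  let lato_b := (PySem.List.pyGetD fin 1 (0,0)).1 - 1
  (PySem.List.pyRange 0 base 1).map (fun x => (lato_a, x))
    ++ ((PySem.List.pyRange 0 altezza 1).map (fun y => (y, lato_b))
    ++ ((PySem.List.pyRange 0 base 1).map (fun y => (lato_b, y))
    ++ (PySem.List.pyRange 0 altezza 1).map (fun x => (x, lato_a))))

-- per-rectangle body as B computes it (one map over the combined index range)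
def pvBodyB (fin : List (Int × Int)) : List (Int × Int) :=
  let base := (PySem.List.pyGetD fin 1 (0,0)).1 - (PySem.List.pyGetD fin 0 (0,0)).1
  let altezza := (PySem.List.pyGetD fin 2 (0,0)).2 - (PySem.List.pyGetD fin 3 (0,0)).2 - 1
  let a := (PySem.List.pyGetD fin 0 (0,0)).1
  let b := (PySem.List.pyGetD fin 1 (0,0)).1 - 1
  let nb := max base 0
  let na := max altezza 0
  (PySem.List.pyRange 0 (2*nb + 2*na) 1).map (fun k =>
    if k < nb then (a, k)
    else if k < nb + na then (k - nb, b)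
    else if k < 2*nb + na then (b, k - nb - na)
    else (k - 2*nb - na, a))

theorem colora_perimetro_eq_map (img : List (List Int)) (h_ : Int) (w : Int) (fin2 : List (List (Int × Int))) (colori_mod2 : List (List Int)) :
    colora_perimetro img h_ w fin2 colori_mod2 = fin2.map pvBodyA := by
  unfold colora_perimetro
  simp only [PySem.List.foldl_append_singleton_eq_map, List.nil_append, List.append_assoc]
  conv_rhs => rw [← PySem.List.map_pyGetD_pyRange_zero fin2 ([] : List (Int × Int))]
  rw [List.map_map]
  rfl

theorem colora_perimetro_alt_eq_map (img : List (List Int)) (h_ : Int) (w : Int) (fin2 : List (List (Int × Int))) (colori_mod2 : List (List Int)) :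
    colora_perimetro_alt img h_ w fin2 colori_mod2 = fin2.map pvBodyB := by
  unfold colora_perimetro_alt
  simp only [PySem.List.foldl_append_singleton_eq_map, List.nil_append]
  rw [show (PySem.List.enumerate fin2 0).map _ = ((PySem.List.enumerate fin2 0).map (·.2)).map pvBodyB by rw [List.map_map]; rfl]
  rw [PySem.List.map_snd_enumerate]

-- shifting a 1-step range: map over [s, s+n) of f = map over [0, n) of f (s + ·)
theorem pvMapShift {α : Type} (f : Int → α) (s n : Int) :
    (PySem.List.pyRange s (s+n) 1).map f = (PySem.List.pyRange 0 n 1).map (fun k => f (s + k)) := by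
  rw [PySem.List.pyRange_one, PySem.List.pyRange_one, List.map_map, List.map_map]
  simp

-- the range over a clamped bound equals the range over the raw bound
theorem pvRangeMax (m : Int) : PySem.List.pyRange 0 (max m 0) 1 = PySem.List.pyRange 0 m 1 := by
  rcases (by omega : 0 ≤ m ∨ m < 0) with h | h
  · rw [max_eq_left h]
  · rw [max_eq_right h.le, PySem.List.pyRange_one_eq_nil le_rfl, PySem.List.pyRange_one_eq_nil h.le]

theorem pvSides (base altezza a b : Int) :
    (PySem.List.pyRange 0 (2*(max base 0) + 2*(max altezza 0)) 1).map (fun k =>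
      if k < max base 0 then (a, k)
      else if k < max base 0 + max altezza 0 then (k - max base 0, b)
      else if k < 2*(max base 0) + max altezza 0 then (b, k - max base 0 - max altezza 0)
      else (k - 2*(max base 0) - max altezza 0, a))
    = (PySem.List.pyRange 0 base 1).map (fun x => (a, x))
      ++ ((PySem.List.pyRange 0 altezza 1).map (fun y => (y, b))
      ++ ((PySem.List.pyRange 0 base 1).map (fun y => (b, y))
      ++ (PySem.List.pyRange 0 altezza 1).map (fun x => (x, a)))) := by
  have hnb0 : (0:Int) ≤ max base 0 := le_max_right _ _
  have hna0 : (0:Int) ≤ max altezza 0 := le_max_right _ _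
  set nb := max base 0 with hnb
  set na := max altezza 0 with hna
  rw [PySem.List.pyRange_one_append 0 nb (2*nb + 2*na) (by omega) (by omega),
      PySem.List.pyRange_one_append nb (nb + na) (2*nb + 2*na) (by omega) (by omega),
      PySem.List.pyRange_one_append (nb + na) (2*nb + na) (2*nb + 2*na) (by omega) (by omega)]
  simp only [List.map_append]
  congr 1
  · rw [List.map_congr_left (g := fun k => (a, k))
      (fun k hk => by
        have := (PySem.List.mem_pyRange_one).1 hk
        rw [if_pos (by omega)]),
      hnb, pvRangeMax base]
  congr 1
  · rw [List.map_congr_left (g := fun k => (k - nb, b))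
      (fun k hk => by
        have := (PySem.List.mem_pyRange_one).1 hk
        rw [if_neg (by omega), if_pos (by omega)]),
      pvMapShift (fun k => ((k - nb : Int), b)) nb na]
    simp only [add_sub_cancel_left]
    rw [hna, pvRangeMax altezza]
  congr 1
  · rw [List.map_congr_left (g := fun k => (b, k - nb - na))
      (fun k hk => by
        have := (PySem.List.mem_pyRange_one).1 hk
        rw [if_neg (by omega), if_neg (by omega), if_pos (by omega)]),
      show (2*nb + na) = (nb + na) + nb by ring,
      pvMapShift (fun k => (b, (k - nb - na : Int))) (nb + na) nb]
    simp only [show ∀ k : Int, nb + na + k - nb - na = k from fun k => by ring]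
    rw [hnb, pvRangeMax base]
  · rw [List.map_congr_left (g := fun k => (k - 2*nb - na, a))
      (fun k hk => by
        have := (PySem.List.mem_pyRange_one).1 hk
        rw [if_neg (by omega), if_neg (by omega), if_neg (by omega)]),
      show (2*nb + 2*na) = (2*nb + na) + na by ring,
      pvMapShift (fun k => ((k - 2*nb - na : Int), a)) (2*nb + na) na]
    simp only [show ∀ k : Int, 2*nb + na + k - 2*nb - na = k from fun k => by ring]
    rw [hna, pvRangeMax altezza]

theorem pvBody_eq (fin : List (Int × Int)) : pvBodyB fin = pvBodyA fin := by
  unfold pvBodyA pvBodyB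
  exact pvSides _ _ _ _

-- ===== VERDICT (by name: the statement is the Claim_ definition above) =====
theorem colora_perimetro_spec : Claim_equal_colora_perimetro := by
  intro img h_ w fin2 colori_mod2 _hdom _hpre
  unfold Spec_colora_perimetro
  rw [colora_perimetro_eq_map, colora_perimetro_alt_eq_map]
  exact (List.map_congr_left fun fin _ => (pvBody_eq fin)).symm ▸ rfl
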